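-- pv_equiv track=rewrite | github.com/OlegLeo/Data-Driven-Lead-Scoring | lead_scoring.py | calculate_lead_score
-- ===== SOURCE A (Python) =====
-- def calculate_lead_score(company_size, job_title, location, industry):
--     """Calculate lead score based on company size, job title, location, and industry."""
--     score = 0
--
--     # Normalize text
--     job_title = job_title.lower()
--     location = location.lower()
--     industry = industry.lower()
--
--     # Company Size
--     if company_size >= 10000:
--         score += 10
--     elif 5000 <= company_size < 10000:
--         score += 5
--     elif 2000 <= company_size < 5000:
--         score += 4
--     elif 1000 <= company_size < 2000:
--         score += 3
--     elif 500 <= company_size < 1000: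
--         score += 2
--     elif 100 <= company_size < 500:
--         score += 1
--
--     # Job Title
--     if any(title in job_title for title in ["cto", "ceo", "founder"]):
--         score += 6
--     elif any(title in job_title for title in ["vp", "vice president", "director", "head"]):
--         score += 4
--     elif any(title in job_title for title in ["engineer", "developer", "scientist", "architect", "manager", "owner", "scrum master"]):
--         score += 1
--
--     # Industry
--     if industry in [
--         "saas", "fintech", "healthtech", "ai", "cybersecurity", "cloud services",
--         "edtech", "blockchain", "devtools", "e-commerce tech", "iot solutions", "analytics platform"
--     ]:
--         score += 2
--     else:
--         score += 1
--
--     # Location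
--     high_priority_locations = [
--         "san francisco", "new york", "seattle", "austin", "boston", "berlin",
--         "london", "toronto", "amsterdam", "tel aviv", "lisbon", "chicago", "paris", "los angeles"
--     ]
--     medium_priority_locations = ["miami", "dallas", "vancouver", "madrid", "munich"]
--
--     if location in high_priority_locations:
--         score += 2
--     elif location in medium_priority_locations:
--         score += 1
--
--     return score
-- ===== SOURCE B (Python) =====
-- _HOT = {"saas", "fintech", "healthtech", "ai", "cybersecurity", "cloud services",
--         "edtech", "blockchain", "devtools", "e-commerce tech", "iot solutions",
--         "analytics platform"}
-- _HIGH = {"san francisco", "new york", "seattle", "austin", "boston", "berlin",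
--          "london", "toronto", "amsterdam", "tel aviv", "lisbon", "chicago",
--          "paris", "los angeles"}
-- _MED = {"miami", "dallas", "vancouver", "madrid", "munich"}
--
--
-- def _best(rules):
--     """Highest point value among the satisfied rules (0 if none match).
--
--     Rules may overlap: because point values strictly decrease down each of A's
--     if/elif cascades, the MAXIMUM satisfied rule equals the first satisfied
--     branch, so no ordering or first-match logic is needed.
--     """
--     return max((pts for hit, pts in rules if hit), default=0)
--
--
-- def calculate_lead_score(company_size, job_title, location, industry):
--     """Calculate lead score based on company size, job title, location, and industry."""
--     jt = job_title.lower()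
--     loc = location.lower()
--     ind = industry.lower()
--     return (
--         _best([(company_size >= t, p) for t, p in
--                ((100, 1), (500, 2), (1000, 3), (2000, 4), (5000, 5), (10000, 10))])
--         + _best([(any(k in jt for k in kws), p) for kws, p in
--                  ((("cto", "ceo", "founder"), 6),
--                   (("vp", "vice president", "director", "head"), 4),
--                   (("engineer", "developer", "scientist", "architect",
--                     "manager", "owner", "scrum master"), 1))])
--         + 1 + _best([(ind in _HOT, 1)])
--         + _best([(loc in _HIGH, 2), (loc in _MED, 1)])
--     )
-- ===== Notes on version B (the rewrite author's own statement) =====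
-- stated objective: alternative
-- what changed: Replaces A's ordered first-match if/elif cascades with an order-independent max-aggregation: each component is the maximum point value over a set of overlapping (condition, points) rules (e.g. company_size >= t rules that may all fire), correct because points strictly decrease down each of A's cascades so the maximum satisfied rule equals the first satisfied branch.
import Mathlib
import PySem

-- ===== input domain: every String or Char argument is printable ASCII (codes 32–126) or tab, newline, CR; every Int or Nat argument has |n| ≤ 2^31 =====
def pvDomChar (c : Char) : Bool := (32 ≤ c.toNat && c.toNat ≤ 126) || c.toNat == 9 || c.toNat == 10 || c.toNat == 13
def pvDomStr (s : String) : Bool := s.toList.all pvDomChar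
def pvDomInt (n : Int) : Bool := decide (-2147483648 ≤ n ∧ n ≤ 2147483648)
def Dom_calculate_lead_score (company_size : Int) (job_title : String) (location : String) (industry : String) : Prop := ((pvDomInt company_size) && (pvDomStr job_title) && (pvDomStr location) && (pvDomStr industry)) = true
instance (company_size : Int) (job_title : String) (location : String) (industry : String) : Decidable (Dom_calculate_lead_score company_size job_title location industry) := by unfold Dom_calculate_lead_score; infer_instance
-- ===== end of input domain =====

-- B replaces A's ordered first-match if/elif cascades with an order-independent
-- max-aggregation over overlapping (condition, points) rules; objective: alternative.

-- ===== PORT A =====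
def calculate_lead_score (company_size : Int) (job_title : String) (location : String) (industry : String) : Int :=
  let jt := PySem.Str.lower job_title
  let loc := PySem.Str.lower location
  let ind := PySem.Str.lower industry
  let score : Int := 0
  let score :=
    if company_size ≥ 10000 then score + 10
    else if 5000 ≤ company_size ∧ company_size < 10000 then score + 5
    else if 2000 ≤ company_size ∧ company_size < 5000 then score + 4
    else if 1000 ≤ company_size ∧ company_size < 2000 then score + 3
    else if 500 ≤ company_size ∧ company_size < 1000 then score + 2
    else if 100 ≤ company_size ∧ company_size < 500 then score + 1
    else score
  let score :=
    if (["cto", "ceo", "founder"] : List String).any (fun t => PySem.Str.isIn t jt) then score + 6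
    else if (["vp", "vice president", "director", "head"] : List String).any (fun t => PySem.Str.isIn t jt) then score + 4
    else if (["engineer", "developer", "scientist", "architect", "manager", "owner", "scrum master"] : List String).any (fun t => PySem.Str.isIn t jt) then score + 1
    else score
  let score :=
    if (["saas", "fintech", "healthtech", "ai", "cybersecurity", "cloud services",
         "edtech", "blockchain", "devtools", "e-commerce tech", "iot solutions", "analytics platform"] : List String).contains ind
    then score + 2 else score + 1
  let high : List String := ["san francisco", "new york", "seattle", "austin", "boston", "berlin",
    "london", "toronto", "amsterdam", "tel aviv", "lisbon", "chicago", "paris", "los angeles"]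
  let medium : List String := ["miami", "dallas", "vancouver", "madrid", "munich"]
  let score :=
    if high.contains loc then score + 2
    else if medium.contains loc then score + 1
    else score
  score

-- ===== PORT B =====
def pvHot : PySem.Set String :=
  PySem.Set.ofList ["saas", "fintech", "healthtech", "ai", "cybersecurity", "cloud services",
    "edtech", "blockchain", "devtools", "e-commerce tech", "iot solutions", "analytics platform"]
def pvHigh : PySem.Set String :=
  PySem.Set.ofList ["san francisco", "new york", "seattle", "austin", "boston", "berlin",
    "london", "toronto", "amsterdam", "tel aviv", "lisbon", "chicago", "paris", "los angeles"]
def pvMed : PySem.Set String := PySem.Set.ofList ["miami", "dallas", "vancouver", "madrid", "munich"]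

-- Source B's _best: max(pts for satisfied rules, default 0)
def pvBest (rules : List (Bool × Int)) : Int :=
  (PySem.List.max? ((rules.filter (·.1)).map (·.2)) (fun x => x)).getD 0

def calculate_lead_score_alt (company_size : Int) (job_title : String) (location : String) (industry : String) : Int :=
  let jt := PySem.Str.lower job_title
  let loc := PySem.Str.lower location
  let ind := PySem.Str.lower industry
  pvBest (([(100, 1), (500, 2), (1000, 3), (2000, 4), (5000, 5), (10000, 10)] : List (Int × Int)).map
      (fun tp => (decide (company_size ≥ tp.1), tp.2)))
  + pvBest (([ (["cto", "ceo", "founder"], 6),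
               (["vp", "vice president", "director", "head"], 4),
               (["engineer", "developer", "scientist", "architect", "manager", "owner", "scrum master"], 1) ] : List (List String × Int)).map
      (fun kp => (kp.1.any (fun k => PySem.Str.isIn k jt), kp.2)))
  + 1 + pvBest [(pvHot.contains ind, 1)]
  + pvBest [(pvHigh.contains loc, 2), (pvMed.contains loc, 1)]

-- ===== PRECONDITION & SPEC =====
def Spec_calculate_lead_score (company_size : Int) (job_title : String) (location : String) (industry : String) (out : Int) : Prop := out = calculate_lead_score_alt company_size job_title location industry
instance (company_size : Int) (job_title : String) (location : String) (industry : String) (out : Int) : Decidable (Spec_calculate_lead_score company_size job_title location industry out) := by unfold Spec_calculate_lead_score; infer_instance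

-- ===== CLAIM (what is proved, stated in full; the proofs are below) =====
def Claim_equal_calculate_lead_score : Prop := ∀ (company_size : Int) (job_title : String) (location : String) (industry : String), Dom_calculate_lead_score company_size job_title location industry → Spec_calculate_lead_score company_size job_title location industry (calculate_lead_score company_size job_title location industry)

-- ===== LEMMAS AND PROOFS =====

lemma size_component (cs : Int) :
    (if cs ≥ 10000 then (10 : Int)
     else if 5000 ≤ cs ∧ cs < 10000 then 5
     else if 2000 ≤ cs ∧ cs < 5000 then 4
     else if 1000 ≤ cs ∧ cs < 2000 then 3
     else if 500 ≤ cs ∧ cs < 1000 then 2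
     else if 100 ≤ cs ∧ cs < 500 then 1
     else 0)
    = pvBest [(decide (cs ≥ 100), 1), (decide (cs ≥ 500), 2), (decide (cs ≥ 1000), 3),
              (decide (cs ≥ 2000), 4), (decide (cs ≥ 5000), 5), (decide (cs ≥ 10000), 10)] := by
  by_cases h1 : (100:Int) ≤ cs <;> by_cases h2 : (500:Int) ≤ cs <;>
  by_cases h3 : (1000:Int) ≤ cs <;> by_cases h4 : (2000:Int) ≤ cs <;>
  by_cases h5 : (5000:Int) ≤ cs <;> by_cases h6 : (10000:Int) ≤ cs <;>
  simp_all [pvBest, PySem.List.max?, ge_iff_le] <;> omega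

lemma title_component (jt : String) :
    (if (["cto", "ceo", "founder"] : List String).any (fun t => PySem.Str.isIn t jt) then (6 : Int)
     else if (["vp", "vice president", "director", "head"] : List String).any (fun t => PySem.Str.isIn t jt) then 4
     else if (["engineer", "developer", "scientist", "architect", "manager", "owner", "scrum master"] : List String).any (fun t => PySem.Str.isIn t jt) then 1
     else 0)
    = pvBest [((["cto", "ceo", "founder"] : List String).any (fun t => PySem.Str.isIn t jt), 6),
              ((["vp", "vice president", "director", "head"] : List String).any (fun t => PySem.Str.isIn t jt), 4),
              ((["engineer", "developer", "scientist", "architect", "manager", "owner", "scrum master"] : List String).any (fun t => PySem.Str.isIn t jt), 1)] := by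
  generalize (["cto", "ceo", "founder"] : List String).any (fun t => PySem.Str.isIn t jt) = b1
  generalize (["vp", "vice president", "director", "head"] : List String).any (fun t => PySem.Str.isIn t jt) = b2
  generalize (["engineer", "developer", "scientist", "architect", "manager", "owner", "scrum master"] : List String).any (fun t => PySem.Str.isIn t jt) = b3
  cases b1 <;> cases b2 <;> cases b3 <;> rfl

lemma industry_component (ind : String) :
    (if (["saas", "fintech", "healthtech", "ai", "cybersecurity", "cloud services",
          "edtech", "blockchain", "devtools", "e-commerce tech", "iot solutions", "analytics platform"] : List String).contains ind
     then (1 : Int) else 0)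
    = pvBest [(pvHot.contains ind, 1)] := by
  have h : pvHot.contains ind
      = (["saas", "fintech", "healthtech", "ai", "cybersecurity", "cloud services",
          "edtech", "blockchain", "devtools", "e-commerce tech", "iot solutions", "analytics platform"] : List String).contains ind := by
    rw [show pvHot = (["saas", "fintech", "healthtech", "ai", "cybersecurity", "cloud services",
          "edtech", "blockchain", "devtools", "e-commerce tech", "iot solutions", "analytics platform"] : List String) from by decide]
    simp
  rw [h]
  generalize (["saas", "fintech", "healthtech", "ai", "cybersecurity", "cloud services",
      "edtech", "blockchain", "devtools", "e-commerce tech", "iot solutions", "analytics platform"] : List String).contains ind = b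
  cases b <;> rfl

lemma location_component (loc : String) :
    (if (["san francisco", "new york", "seattle", "austin", "boston", "berlin",
          "london", "toronto", "amsterdam", "tel aviv", "lisbon", "chicago", "paris", "los angeles"] : List String).contains loc then (2 : Int)
     else if (["miami", "dallas", "vancouver", "madrid", "munich"] : List String).contains loc then 1
     else 0)
    = pvBest [(pvHigh.contains loc, 2), (pvMed.contains loc, 1)] := by
  have hh : pvHigh.contains loc
      = (["san francisco", "new york", "seattle", "austin", "boston", "berlin",
          "london", "toronto", "amsterdam", "tel aviv", "lisbon", "chicago", "paris", "los angeles"] : List String).contains loc := by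
    rw [show pvHigh = (["san francisco", "new york", "seattle", "austin", "boston", "berlin",
          "london", "toronto", "amsterdam", "tel aviv", "lisbon", "chicago", "paris", "los angeles"] : List String) from by decide]
    simp
  have hm : pvMed.contains loc
      = (["miami", "dallas", "vancouver", "madrid", "munich"] : List String).contains loc := by
    rw [show pvMed = (["miami", "dallas", "vancouver", "madrid", "munich"] : List String) from by decide]
    simp
  rw [hh, hm]
  generalize (["san francisco", "new york", "seattle", "austin", "boston", "berlin",
      "london", "toronto", "amsterdam", "tel aviv", "lisbon", "chicago", "paris", "los angeles"] : List String).contains loc = b1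
  generalize (["miami", "dallas", "vancouver", "madrid", "munich"] : List String).contains loc = b2
  cases b1 <;> cases b2 <;> rfl

lemma sizeA (c1 c2 c3 c4 c5 c6 : Prop) [Decidable c1] [Decidable c2] [Decidable c3]
    [Decidable c4] [Decidable c5] [Decidable c6] (s : Int) :
    (if c1 then s + 10 else if c2 then s + 5 else if c3 then s + 4
     else if c4 then s + 3 else if c5 then s + 2 else if c6 then s + 1 else s)
    = s + (if c1 then 10 else if c2 then 5 else if c3 then 4
           else if c4 then 3 else if c5 then 2 else if c6 then 1 else 0) := by
  split_ifs <;> ring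

lemma titleA (b1 b2 b3 : Bool) (s : Int) :
    (if b1 then s + 6 else if b2 then s + 4 else if b3 then s + 1 else s)
    = s + (if b1 then 6 else if b2 then 4 else if b3 then 1 else 0) := by
  cases b1 <;> cases b2 <;> cases b3 <;> simp

lemma indA (b : Bool) (s : Int) :
    (if b then s + 2 else s + 1) = s + 1 + (if b then 1 else 0) := by
  cases b <;> simp <;> omega

lemma locA (b1 b2 : Bool) (s : Int) :
    (if b1 then s + 2 else if b2 then s + 1 else s)
    = s + (if b1 then 2 else if b2 then 1 else 0) := by
  cases b1 <;> cases b2 <;> simp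

-- ===== VERDICT (by name: the statement is the Claim_ definition above) =====
theorem calculate_lead_score_spec : Claim_equal_calculate_lead_score := by
  intro cs jt loc ind _
  unfold Spec_calculate_lead_score calculate_lead_score calculate_lead_score_alt
  simp only [List.map]
  rw [sizeA, titleA, indA, locA,
      size_component, title_component, industry_component, location_component, zero_add]
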